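-- pv_equiv track=rewrite | github.com/mecaneer23/logic-puzzles | project-euler/015_lattice_paths.py | remove_top_right_vertice
-- ===== SOURCE A (Python) =====
-- def remove_top_right_vertice(
--     current_vertices: list[tuple[int, int]], grid_size: int
-- ) -> list[tuple[int, int]]:
--     """Remove the top right most vertice from a list of points"""
--     for i in range(grid_size + 1):
--         for j in range(grid_size, -1, -1):
--             if (i, j) in current_vertices and (i, j) not in {
--                 (0, 0),
--                 (grid_size, grid_size),
--             }:
--                 current_vertices.remove((i, j))
--                 return current_vertices
--     raise ValueError("No more points to remove")
-- ===== SOURCE B (Python) =====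
-- def remove_top_right_vertice(
--     current_vertices: list[tuple[int, int]], grid_size: int
-- ) -> list[tuple[int, int]]:
--     """Remove the top right most vertice from a list of points"""
--     corners = {(0, 0), (grid_size, grid_size)}
--     candidates = [
--         v
--         for v in current_vertices
--         if 0 <= v[0] <= grid_size and 0 <= v[1] <= grid_size and v not in corners
--     ]
--     if not candidates:
--         raise ValueError("No more points to remove")
--     current_vertices.remove(min(candidates, key=lambda v: (v[0], -v[1])))
--     return current_vertices
-- ===== Notes on version B (the rewrite author's own statement) =====
-- stated objective: faster
-- what changed: Replaces A's nested scan over all (grid_size+1)^2 grid positions (with a list membership test at each) by a single pass: filter the vertex list down to in-grid non-corner candidates and pick the minimum under the key (i, -j), which is exactly the first position A's scan order would hit.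
import Mathlib
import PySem

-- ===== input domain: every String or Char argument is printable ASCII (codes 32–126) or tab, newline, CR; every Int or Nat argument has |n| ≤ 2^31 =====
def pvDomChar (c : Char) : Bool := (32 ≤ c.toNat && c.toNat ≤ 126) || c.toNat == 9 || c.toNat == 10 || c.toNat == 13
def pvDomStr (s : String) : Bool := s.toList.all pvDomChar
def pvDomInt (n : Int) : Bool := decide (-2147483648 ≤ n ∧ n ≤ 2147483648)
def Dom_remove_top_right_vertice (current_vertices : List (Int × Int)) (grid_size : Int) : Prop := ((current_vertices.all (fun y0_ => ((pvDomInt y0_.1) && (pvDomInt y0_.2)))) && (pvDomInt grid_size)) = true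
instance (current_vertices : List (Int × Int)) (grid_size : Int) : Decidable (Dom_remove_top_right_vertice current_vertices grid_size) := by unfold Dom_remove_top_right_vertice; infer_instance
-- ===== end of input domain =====

-- B replaces A's nested scan over all grid positions with one linear pass (filter + min by
-- key (i,-j)); both A and B mutate the Python argument list in place in the same way, the
-- equivalence proved here is about the returned value.

-- ===== PORT A =====
-- the loop-body condition: '(i, j) in current_vertices and (i, j) not in {(0,0),(gs,gs)}'
def pvQ (cv : List (Int × Int)) (gs : Int) (v : Int × Int) : Bool :=
  cv.contains v && !(v == ((0 : Int), (0 : Int)) || v == (gs, gs))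

-- inner 'for j in range(grid_size, -1, -1)' loop
def pvAinner (cv : List (Int × Int)) (gs i : Int) : List Int → Option (List (Int × Int))
  | [] => none
  | j :: js =>
    if pvQ cv gs (i, j) then some ((PySem.List.remove? cv (i, j)).getD cv)
    else pvAinner cv gs i js

-- outer 'for i in range(grid_size + 1)' loop
def pvAouter (cv : List (Int × Int)) (gs : Int) : List Int → Option (List (Int × Int))
  | [] => none
  | i :: is' =>
    match pvAinner cv gs i (PySem.List.pyRange gs (-1) (-1)) with
    | some r => some r
    | none => pvAouter cv gs is'

def remove_top_right_vertice (current_vertices : List (Int × Int)) (grid_size : Int) : List (Int × Int) :=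
  -- falling off both loops raises ValueError in Python; that case is outside Pre_ (getD [] is arbitrary)
  (pvAouter current_vertices grid_size (PySem.List.pyRange 0 (grid_size + 1) 1)).getD []

-- ===== PORT B =====
-- the list comprehension of Source B
def pvCandidates (cv : List (Int × Int)) (gs : Int) : List (Int × Int) :=
  cv.filter (fun v =>
    decide (0 ≤ v.1) && decide (v.1 ≤ gs) && decide (0 ≤ v.2) && decide (v.2 ≤ gs) &&
      !(v == ((0 : Int), (0 : Int)) || v == (gs, gs)))

def remove_top_right_vertice_alt (current_vertices : List (Int × Int)) (grid_size : Int) : List (Int × Int) :=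
  match PySem.List.min2? (pvCandidates current_vertices grid_size) (fun v => v.1) (fun v => -v.2) with
  | none => []  -- Source B raises ValueError here; outside Pre_
  | some t => (PySem.List.remove? current_vertices t).getD current_vertices

-- ===== PRECONDITION & SPEC =====
-- Pre_ excludes exactly the inputs on which both Pythons raise ValueError: no in-grid,
-- non-corner vertex is present in the list.
def Pre_remove_top_right_vertice (current_vertices : List (Int × Int)) (grid_size : Int) : Prop :=
  ∃ v ∈ current_vertices, 0 ≤ v.1 ∧ v.1 ≤ grid_size ∧ 0 ≤ v.2 ∧ v.2 ≤ grid_size ∧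
    v ≠ (0, 0) ∧ v ≠ (grid_size, grid_size)

instance (current_vertices : List (Int × Int)) (grid_size : Int) : Decidable (Pre_remove_top_right_vertice current_vertices grid_size) := by
  unfold Pre_remove_top_right_vertice; infer_instance

def pvWitness_remove_top_right_vertice : (List (Int × Int)) × Int := ([(1, 1), (0, 0)], 2)

def Spec_remove_top_right_vertice (current_vertices : List (Int × Int)) (grid_size : Int) (out : List (Int × Int)) : Prop := out = remove_top_right_vertice_alt current_vertices grid_size
instance (current_vertices : List (Int × Int)) (grid_size : Int) (out : List (Int × Int)) : Decidable (Spec_remove_top_right_vertice current_vertices grid_size out) := by unfold Spec_remove_top_right_vertice; infer_instance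

-- ===== CLAIM (what is proved, stated in full; the proofs are below) =====
def Claim_equal_remove_top_right_vertice : Prop := ∀ (current_vertices : List (Int × Int)) (grid_size : Int), Dom_remove_top_right_vertice current_vertices grid_size → Pre_remove_top_right_vertice current_vertices grid_size → Spec_remove_top_right_vertice current_vertices grid_size (remove_top_right_vertice current_vertices grid_size)

-- ===== LEMMAS AND PROOFS =====

-- the scan order of A: i ascending, j descending — as a strict order on positions
def pvKeyLt (u v : Int × Int) : Prop := u.1 < v.1 ∨ (u.1 = v.1 ∧ v.2 < u.2)

theorem pvKeyLt_irrefl (v : Int × Int) : ¬ pvKeyLt v v := by simp [pvKeyLt]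

theorem pvKeyLt_trans {a b c : Int × Int} (h1 : pvKeyLt a b) (h2 : pvKeyLt b c) : pvKeyLt a c := by
  rcases h1 with h1 | ⟨h1, h1'⟩ <;> rcases h2 with h2 | ⟨h2, h2'⟩ <;> simp [pvKeyLt] <;> omega

theorem pvKeyLt_total {a b : Int × Int} (h1 : ¬ pvKeyLt a b) (h2 : ¬ pvKeyLt b a) : a = b := by
  simp [pvKeyLt] at h1 h2
  have : a.1 = b.1 ∧ a.2 = b.2 := by omega
  exact Prod.ext this.1 this.2

theorem pvKeyLt_of_not_of_lt {a b c : Int × Int} (h1 : ¬ pvKeyLt a b) (h2 : pvKeyLt a c) : pvKeyLt b c := by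
  simp [pvKeyLt] at *; omega

-- the flattened list of grid positions in A's scan order
def pvL (gs : Int) : List (Int × Int) :=
  (PySem.List.pyRange 0 (gs + 1) 1).flatMap (fun i => (PySem.List.pyRange gs (-1) (-1)).map (fun j => (i, j)))

theorem pvMem_L {gs : Int} {v : Int × Int} :
    v ∈ pvL gs ↔ 0 ≤ v.1 ∧ v.1 ≤ gs ∧ 0 ≤ v.2 ∧ v.2 ≤ gs := by
  constructor
  · intro h
    rw [pvL, List.mem_flatMap] at h
    obtain ⟨i, hi, h⟩ := h
    rw [List.mem_map] at h
    obtain ⟨j, hj, hv⟩ := h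
    rw [PySem.List.mem_pyRange_one] at hi
    rw [PySem.List.mem_pyRange_neg_one] at hj
    subst hv
    simp only
    omega
  · rintro ⟨h1, h2, h3, h4⟩
    rw [pvL, List.mem_flatMap]
    refine ⟨v.1, ?_, ?_⟩
    · rw [PySem.List.mem_pyRange_one]; omega
    · rw [List.mem_map]
      exact ⟨v.2, by rw [PySem.List.mem_pyRange_neg_one]; omega, by simp⟩

theorem pvPairwise_js {gs : Int} : (PySem.List.pyRange gs (-1) (-1)).Pairwise (fun a b : Int => b < a) := by
  rw [PySem.List.pyRange_neg_one_eq_reverse]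
  rw [List.pairwise_reverse]
  exact PySem.List.pairwise_lt_pyRange_one _ _

theorem pvPairwise_flatMap (gs : Int) (is' : List Int) (h : is'.Pairwise (· < ·)) :
    (is'.flatMap (fun i => (PySem.List.pyRange gs (-1) (-1)).map (fun j => ((i : Int), j)))).Pairwise pvKeyLt := by
  induction is' with
  | nil => simp
  | cons i rest ih =>
    rw [List.pairwise_cons] at h
    rw [List.flatMap_cons, List.pairwise_append]
    refine ⟨?_, ih h.2, ?_⟩
    · rw [List.pairwise_map]
      exact (pvPairwise_js (gs := gs)).imp (fun {a b} hab => Or.inr ⟨rfl, hab⟩)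
    · intro a ha b hb
      rw [List.mem_map] at ha
      obtain ⟨j, _, rfl⟩ := ha
      rw [List.mem_flatMap] at hb
      obtain ⟨i', hi', hb⟩ := hb
      rw [List.mem_map] at hb
      obtain ⟨j', _, rfl⟩ := hb
      exact Or.inl (h.1 i' hi')

theorem pvPairwise_L (gs : Int) : (pvL gs).Pairwise pvKeyLt :=
  pvPairwise_flatMap gs _ (PySem.List.pairwise_lt_pyRange_one _ _)

-- find? on a pvKeyLt-sorted list returns the pvKeyLt-least match
theorem pvFind?_first {q : Int × Int → Bool} {l : List (Int × Int)} {t : Int × Int}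
    (hp : l.Pairwise pvKeyLt) (ht : l.find? q = some t) :
    ∀ u ∈ l, q u = true → ¬ pvKeyLt u t := by
  induction l with
  | nil => simp at ht
  | cons x rest ih =>
    rw [List.pairwise_cons] at hp
    intro u hu hq
    by_cases hx : q x = true
    · rw [List.find?_cons_of_pos hx] at ht
      cases ht
      rcases List.mem_cons.mp hu with rfl | hu
      · exact pvKeyLt_irrefl u
      · intro habs
        exact pvKeyLt_irrefl _ (pvKeyLt_trans (hp.1 u hu) habs)
    · rw [List.find?_cons_of_neg hx] at ht
      rcases List.mem_cons.mp hu with rfl | hu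
      · exact absurd hq hx
      · exact ih hp.2 ht u hu hq

-- pvQ characterization
theorem pvQ_iff {cv : List (Int × Int)} {gs : Int} {v : Int × Int} :
    pvQ cv gs v = true ↔ v ∈ cv ∧ v ≠ (0, 0) ∧ v ≠ (gs, gs) := by
  simp [pvQ]

-- A's inner loop is find? over the j-range
theorem pvAinner_eq (cv : List (Int × Int)) (gs i : Int) (js : List Int) :
    pvAinner cv gs i js = (js.find? (fun j => pvQ cv gs (i, j))).map (fun j => cv.erase (i, j)) := by
  induction js with
  | nil => rfl
  | cons j js ih =>
    by_cases h : pvQ cv gs (i, j) = true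
    · have hmem : (i, j) ∈ cv := (pvQ_iff.mp h).1
      have hf : (j :: js).find? (fun j' => pvQ cv gs (i, j')) = some j :=
        List.find?_cons_of_pos (by simpa using h)
      rw [pvAinner, if_pos h, hf, PySem.List.remove?_eq_some_erase cv _ hmem]
      rfl
    · have hf : (j :: js).find? (fun j' => pvQ cv gs (i, j')) =
          js.find? (fun j' => pvQ cv gs (i, j')) :=
        List.find?_cons_of_neg (by simpa using h)
      rw [pvAinner, if_neg h, hf, ih]

-- A's outer loop is find? over the flattened scan list
theorem pvAouter_eq (cv : List (Int × Int)) (gs : Int) (is' : List Int) :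
    pvAouter cv gs is' =
      ((is'.flatMap (fun i => (PySem.List.pyRange gs (-1) (-1)).map (fun j => (i, j)))).find?
        (pvQ cv gs)).map (fun v => cv.erase v) := by
  induction is' with
  | nil => rfl
  | cons i rest ih =>
    rw [List.flatMap_cons, List.find?_append, List.find?_map]
    rw [pvAouter, pvAinner_eq, ih]
    rcases hfi : (PySem.List.pyRange gs (-1) (-1)).find? (pvQ cv gs ∘ fun j => (i, j)) with _ | j
    · have : (PySem.List.pyRange gs (-1) (-1)).find? (fun j => pvQ cv gs (i, j)) = none := hfi
      rw [this]; rfl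
    · have : (PySem.List.pyRange gs (-1) (-1)).find? (fun j => pvQ cv gs (i, j)) = some j := hfi
      rw [this]; rfl

theorem pvA_eq_find (cv : List (Int × Int)) (gs : Int) :
    remove_top_right_vertice cv gs = (((pvL gs).find? (pvQ cv gs)).map (fun v => cv.erase v)).getD [] := by
  rw [remove_top_right_vertice, pvAouter_eq]; rfl

-- candidate-list characterization
theorem pvMem_candidates {cv : List (Int × Int)} {gs : Int} {v : Int × Int} :
    v ∈ pvCandidates cv gs ↔
      v ∈ cv ∧ 0 ≤ v.1 ∧ v.1 ≤ gs ∧ 0 ≤ v.2 ∧ v.2 ≤ gs ∧ v ≠ (0, 0) ∧ v ≠ (gs, gs) := by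
  simp [pvCandidates, List.mem_filter, and_assoc]

-- min2?'s fold step, specialized to the key (v.1, -v.2)
def pvStep (acc : Option (Int × Int)) (x : Int × Int) : Option (Int × Int) :=
  match acc with
  | none => some x
  | some m =>
    if (decide (x.1 < m.1) || !decide (m.1 < x.1) && decide (-x.2 < -m.2)) = true then some x
    else some m

theorem pvMin2?_eq (xs : List (Int × Int)) :
    PySem.List.min2? xs (fun v => v.1) (fun v => -v.2) = xs.foldl pvStep none := by
  unfold PySem.List.min2?
  congr 1
  funext acc x
  cases acc <;> rfl

theorem pvStep_cond {x m : Int × Int} :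
    ((decide (x.1 < m.1) || !decide (m.1 < x.1) && decide (-x.2 < -m.2)) = true) ↔ pvKeyLt x m := by
  simp [pvKeyLt]; omega

theorem pvStep_some_pos {x m : Int × Int} (h : pvKeyLt x m) : pvStep (some m) x = some x := by
  simp only [pvStep]
  rw [if_pos (pvStep_cond.mpr h)]

theorem pvStep_some_neg {x m : Int × Int} (h : ¬ pvKeyLt x m) : pvStep (some m) x = some m := by
  simp only [pvStep]
  rw [if_neg (fun hb => h (pvStep_cond.mp hb))]

-- the running minimum is a least element of what has been seen
theorem pvMin2_go (xs : List (Int × Int)) : ∀ m0 : Int × Int,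
    ∃ r, xs.foldl pvStep (some m0) = some r ∧ r ∈ m0 :: xs ∧ ∀ u ∈ m0 :: xs, ¬ pvKeyLt u r := by
  induction xs with
  | nil =>
    intro m0
    exact ⟨m0, rfl, by simp, by simpa using pvKeyLt_irrefl m0⟩
  | cons x xs ih =>
    intro m0
    by_cases h : pvKeyLt x m0
    · obtain ⟨r, hr, hmem, hall⟩ := ih x
      refine ⟨r, ?_, List.mem_cons_of_mem _ hmem, ?_⟩
      · rw [List.foldl_cons, pvStep_some_pos h]; exact hr
      · intro u hu
        rcases List.mem_cons.mp hu with rfl | hu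
        · intro habs
          exact hall x List.mem_cons_self (pvKeyLt_trans h habs)
        · exact hall u hu
    · obtain ⟨r, hr, hmem, hall⟩ := ih m0
      refine ⟨r, ?_, ?_, ?_⟩
      · rw [List.foldl_cons, pvStep_some_neg h]; exact hr
      · rcases List.mem_cons.mp hmem with rfl | hm
        · exact List.mem_cons_self
        · exact List.mem_cons_of_mem _ (List.mem_cons_of_mem _ hm)
      · intro u hu
        rcases List.mem_cons.mp hu with rfl | hu
        · exact hall u List.mem_cons_self
        · rcases List.mem_cons.mp hu with rfl | hu
          · intro habs
            exact hall m0 List.mem_cons_self (pvKeyLt_of_not_of_lt h habs)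
          · exact hall u (List.mem_cons_of_mem _ hu)

theorem pvMin2?_least {xs : List (Int × Int)} (hne : xs ≠ []) :
    ∃ m, PySem.List.min2? xs (fun v => v.1) (fun v => -v.2) = some m ∧ m ∈ xs ∧
      ∀ u ∈ xs, ¬ pvKeyLt u m := by
  rcases xs with _ | ⟨c, rest⟩
  · exact absurd rfl hne
  · obtain ⟨r, hr, hmem, hall⟩ := pvMin2_go rest c
    exact ⟨r, by rw [pvMin2?_eq, List.foldl_cons]; exact hr, hmem, hall⟩

-- ===== VERDICT (by name: the statement is the Claim_ definition above) =====
theorem remove_top_right_vertice_spec : Claim_equal_remove_top_right_vertice := by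
  intro cv gs _ hpre
  obtain ⟨v0, hv0mem, hb1, hb2, hb3, hb4, hc1, hc2⟩ := hpre
  unfold Spec_remove_top_right_vertice
  -- A-side: find? succeeds
  have hv0L : v0 ∈ pvL gs := pvMem_L.mpr ⟨hb1, hb2, hb3, hb4⟩
  have hv0Q : pvQ cv gs v0 = true := pvQ_iff.mpr ⟨hv0mem, hc1, hc2⟩
  have hsome : ((pvL gs).find? (pvQ cv gs)).isSome = true :=
    List.find?_isSome.mpr ⟨v0, hv0L, hv0Q⟩
  obtain ⟨t, ht⟩ := Option.isSome_iff_exists.mp hsome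
  have htQ : pvQ cv gs t = true := List.find?_some ht
  have htL : t ∈ pvL gs := List.mem_of_find?_eq_some ht
  have htC : t ∈ pvCandidates cv gs := by
    obtain ⟨h1, h2, h3⟩ := pvQ_iff.mp htQ
    obtain ⟨g1, g2, g3, g4⟩ := pvMem_L.mp htL
    exact pvMem_candidates.mpr ⟨h1, g1, g2, g3, g4, h2, h3⟩
  -- B-side: min2? succeeds
  have hCne : pvCandidates cv gs ≠ [] := fun h => by rw [h] at htC; exact absurd htC (List.not_mem_nil)
  obtain ⟨m, hm, hmC, hmleast⟩ := pvMin2?_least hCne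
  -- the two selected vertices coincide
  have hmQ : pvQ cv gs m = true := by
    obtain ⟨h1, _, _, _, _, h2, h3⟩ := pvMem_candidates.mp hmC
    exact pvQ_iff.mpr ⟨h1, h2, h3⟩
  have hmL : m ∈ pvL gs := by
    obtain ⟨_, g1, g2, g3, g4, _, _⟩ := pvMem_candidates.mp hmC
    exact pvMem_L.mpr ⟨g1, g2, g3, g4⟩
  have h1 : ¬ pvKeyLt m t := pvFind?_first (pvPairwise_L gs) ht m hmL hmQ
  have h2 : ¬ pvKeyLt t m := hmleast t htC
  have htm : t = m := pvKeyLt_total h2 h1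
  -- both results are cv.erase of the same vertex
  have hmCv : m ∈ cv := (pvMem_candidates.mp hmC).1
  rw [pvA_eq_find, ht, htm]
  simp [remove_top_right_vertice_alt, hm, PySem.List.remove?_eq_some_erase cv m hmCv]
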